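-- pv_equiv track=rewrite | github.com/kikoralston/RIPS | CE/DemandFuncsCE.py | getHoursInMonths
-- ===== SOURCE A (Python) =====
-- def getDaysPerMonth():
--     """Returns list of tuples with number of days in each month
--
--     :return: list of tuples with number of days in each month (month, number of days)
--     """
--     daysPerMonth = [(1, 31), (2, 28), (3, 31), (4, 30), (5, 31), (6, 30), (7, 31), (8, 31), (9, 30), (10, 31), (11, 30),
--                     (12, 31)]
--     return daysPerMonth
--
-- def getHoursInMonths(months):
--     """Get 1d list of hours (1-8760 basis) in given list of months
--
--     :param months: 1d list of months
--     :return: hours in given months (1d list, hours start at 1 in year)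
--     """
--     daysPerMonth = getDaysPerMonth()
--
--     firstDayInMonthsAsDayInYear = getFirstDayInMonthsAsDayInYear(daysPerMonth)
--     daysInMonths = []
--     for month in months:
--         firstDayInMonth = firstDayInMonthsAsDayInYear[month - 1]
--         daysInMonth = [day for day in range(firstDayInMonth, firstDayInMonth + daysPerMonth[month - 1][1])]
--         daysInMonths.extend(daysInMonth)
--     hoursInMonths = []
--     for day in daysInMonths: hoursInMonths.extend([val + 1 for val in range(day * 24, (day + 1) * 24)])
--     return hoursInMonths  # starts @ 1
--
-- def getFirstDayInMonthsAsDayInYear(daysPerMonth):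
--     """Get 1d list of first day each month as day in year (starting at 0)
--
--     :param daysPerMonth: num days each month (list of tuples)
--     :return: first day in each month (1d list) (days start at 0)
--     """
--     firstDayInMonthsAsDayInYear = []
--     for idx in range(len(daysPerMonth)):
--         if idx == 0:
--             firstDayInMonthsAsDayInYear.append(0)
--         else:
--             firstDayInMonthsAsDayInYear.append(firstDayInMonthsAsDayInYear[idx - 1] + daysPriorMonth)
--         (lastMonth, daysPriorMonth) = (daysPerMonth[idx][0], daysPerMonth[idx][1])
--     return firstDayInMonthsAsDayInYear  # starts at 0
-- ===== SOURCE B (Python) =====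
-- def getHoursInMonths(months):
--     """Get 1d list of hours (1-8760 basis) in given list of months.
--
--     A whole month is one contiguous block of hours, so emit a single range
--     per month from cumulative first-day offsets (no day list, no nested pass).
--     """
--     days = [31, 28, 31, 30, 31, 30, 31, 31, 30, 31, 30, 31]
--     offsets = [0]
--     for d in days[:-1]:
--         offsets.append(offsets[-1] + d)
--     hours = []
--     for m in months:
--         first = offsets[m - 1]
--         hours.extend(range(first * 24 + 1, first * 24 + days[m - 1] * 24 + 1))
--     return hours
-- ===== Notes on version B (the rewrite author's own statement) =====
-- stated objective: simpler
-- what changed: B drops A's intermediate day list and the nested day-to-hour expansion pass: it precomputes cumulative first-day offsets as prefix sums and emits one contiguous hour range per month in a single pass.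
import Mathlib
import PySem

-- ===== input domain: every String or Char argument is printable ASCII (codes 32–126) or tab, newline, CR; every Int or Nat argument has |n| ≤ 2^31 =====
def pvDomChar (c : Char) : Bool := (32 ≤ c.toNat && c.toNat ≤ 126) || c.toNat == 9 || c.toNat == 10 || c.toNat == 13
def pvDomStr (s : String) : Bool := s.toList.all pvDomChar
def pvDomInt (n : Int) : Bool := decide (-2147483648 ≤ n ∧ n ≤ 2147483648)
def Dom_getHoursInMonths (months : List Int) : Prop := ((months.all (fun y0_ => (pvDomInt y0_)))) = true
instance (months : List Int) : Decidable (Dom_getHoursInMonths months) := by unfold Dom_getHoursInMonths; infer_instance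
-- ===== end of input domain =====

-- B replaces A's day-list construction and nested day→hour expansion by one
-- contiguous hour range per month, read off precomputed cumulative offsets
-- (objective: simpler single pass; same return value on Pre_).

-- ===== PORT A =====
def getDaysPerMonth : List (Int × Int) :=
  [(1, 31), (2, 28), (3, 31), (4, 30), (5, 31), (6, 30), (7, 31), (8, 31), (9, 30), (10, 31), (11, 30), (12, 31)]

-- the loop carries (firstDayInMonthsAsDayInYear, daysPriorMonth); daysPriorMonth is
-- unbound in Python at idx = 0 but unused there, so it starts from a dummy 0
def getFirstDayInMonthsAsDayInYear (daysPerMonth : List (Int × Int)) : List Int :=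
  ((PySem.List.pyRange 0 (daysPerMonth.length : Int) 1).foldl
    (fun st idx =>
      let fd := st.1
      let fd' := if idx = 0 then fd ++ [0]
                 else fd ++ [(PySem.List.pyGet? fd (idx - 1)).getD 0 + st.2]
      (fd', ((PySem.List.pyGet? daysPerMonth idx).getD (0, 0)).2))
    ([], 0)).1

def getHoursInMonths (months : List Int) : List Int :=
  let daysPerMonth := getDaysPerMonth
  let fdm := getFirstDayInMonthsAsDayInYear daysPerMonth
  let daysInMonths := months.foldl
    (fun acc month =>
      let firstDay := (PySem.List.pyGet? fdm (month - 1)).getD 0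
      acc ++ PySem.List.pyRange firstDay
               (firstDay + ((PySem.List.pyGet? daysPerMonth (month - 1)).getD (0, 0)).2) 1)
    []
  daysInMonths.foldl
    (fun acc day => acc ++ (PySem.List.pyRange (day * 24) ((day + 1) * 24) 1).map (· + 1))
    []

-- ===== PORT B =====
def bDaysPerMonth : List Int := [31, 28, 31, 30, 31, 30, 31, 31, 30, 31, 30, 31]

def bOffsets : List Int :=
  (PySem.List.slice bDaysPerMonth none (some (-1))).foldl
    (fun acc d => acc ++ [(PySem.List.pyGet? acc (-1)).getD 0 + d]) [0]

def getHoursInMonths_alt (months : List Int) : List Int :=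
  months.foldl
    (fun acc m =>
      let first := (PySem.List.pyGet? bOffsets (m - 1)).getD 0
      acc ++ PySem.List.pyRange (first * 24 + 1)
               (first * 24 + ((PySem.List.pyGet? bDaysPerMonth (m - 1)).getD 0) * 24 + 1) 1)
    []

-- ===== PRECONDITION & SPEC =====
-- Pre_ admits exactly the month values whose (month - 1) Python index is in range
-- for the 12-element lists (Python wraps negatives); outside it A raises IndexError.
def Pre_getHoursInMonths (months : List Int) : Prop :=
  ∀ m ∈ months, -11 ≤ m ∧ m ≤ 12
instance (months : List Int) : Decidable (Pre_getHoursInMonths months) := by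
  unfold Pre_getHoursInMonths; infer_instance

def pvWitness_getHoursInMonths : List Int := [2]

def Spec_getHoursInMonths (months : List Int) (out : List Int) : Prop := out = getHoursInMonths_alt months
instance (months : List Int) (out : List Int) : Decidable (Spec_getHoursInMonths months out) := by unfold Spec_getHoursInMonths; infer_instance

-- ===== CLAIM (what is proved, stated in full; the proofs are below) =====
def Claim_equal_getHoursInMonths : Prop := ∀ (months : List Int), Dom_getHoursInMonths months → Pre_getHoursInMonths months → Spec_getHoursInMonths months (getHoursInMonths months)

-- ===== LEMMAS AND PROOFS =====

-- A's hour-expansion of one day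
def pvHourBlock (day : Int) : List Int :=
  (PySem.List.pyRange (day * 24) ((day + 1) * 24) 1).map (· + 1)

lemma pvHourBlock_eq (day : Int) :
    pvHourBlock day = PySem.List.pyRange (day * 24 + 1) ((day + 1) * 24 + 1) 1 := by
  simp only [pvHourBlock, PySem.List.pyRange_one, List.map_map]
  rw [show ((day + 1) * 24 + 1 - (day * 24 + 1)) = ((day + 1) * 24 - day * 24) from by ring]
  apply List.map_congr_left
  intro k _
  simp [Function.comp]; ring

-- expanding a run of n consecutive days gives one contiguous hour range
lemma pvExpand (f : Int) (n : Nat) :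
    (PySem.List.pyRange f (f + n) 1).flatMap pvHourBlock
      = PySem.List.pyRange (f * 24 + 1) (f * 24 + n * 24 + 1) 1 := by
  induction n with
  | zero => simp [PySem.List.pyRange_one_eq_nil]
  | succ n ih =>
      rw [show ((n + 1 : Nat) : Int) = (n : Int) + 1 from by push_cast; ring,
        show f + ((n : Int) + 1) = (f + n) + 1 from by ring,
        PySem.List.pyRange_one_succ_right (by omega), List.flatMap_append, ih]
      simp only [List.flatMap_cons, List.flatMap_nil, List.append_nil, pvHourBlock_eq]
      rw [show ((f + (n : Int)) * 24 + 1) = f * 24 + (n : Int) * 24 + 1 from by ring,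
        show ((f + (n : Int) + 1) * 24 + 1) = f * 24 + ((n : Int) + 1) * 24 + 1 from by ring]
      exact (PySem.List.pyRange_one_append _ _ _ (by omega) (by omega)).symm

-- same bound as an Int
lemma pvExpand' (f nd : Int) (h : 0 ≤ nd) :
    (PySem.List.pyRange f (f + nd) 1).flatMap pvHourBlock
      = PySem.List.pyRange (f * 24 + 1) (f * 24 + nd * 24 + 1) 1 := by
  lift nd to Nat using h
  exact pvExpand f nd

-- A's cumulative first-day list coincides with B's prefix-sum offsets
lemma pvOffsets_agree : getFirstDayInMonthsAsDayInYear getDaysPerMonth = bOffsets := by decide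

lemma pvMonth_block (m : Int) (h1 : -11 ≤ m) (h2 : m ≤ 12) :
    (PySem.List.pyRange
        ((PySem.List.pyGet? (getFirstDayInMonthsAsDayInYear getDaysPerMonth) (m - 1)).getD 0)
        ((PySem.List.pyGet? (getFirstDayInMonthsAsDayInYear getDaysPerMonth) (m - 1)).getD 0 +
          ((PySem.List.pyGet? getDaysPerMonth (m - 1)).getD (0, 0)).2) 1).flatMap pvHourBlock
      = PySem.List.pyRange
          (((PySem.List.pyGet? bOffsets (m - 1)).getD 0) * 24 + 1)
          (((PySem.List.pyGet? bOffsets (m - 1)).getD 0) * 24 +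
            ((PySem.List.pyGet? bDaysPerMonth (m - 1)).getD 0) * 24 + 1) 1 := by
  have hnd : ((PySem.List.pyGet? getDaysPerMonth (m - 1)).getD (0, 0)).2
      = (PySem.List.pyGet? bDaysPerMonth (m - 1)).getD 0 := by
    interval_cases m <;> rfl
  have hpos : (0 : Int) ≤ (PySem.List.pyGet? bDaysPerMonth (m - 1)).getD 0 := by
    interval_cases m <;> decide
  rw [pvOffsets_agree, hnd]
  exact pvExpand' _ _ hpos

-- ===== VERDICT (by name: the statement is the Claim_ definition above) =====
theorem getHoursInMonths_spec : Claim_equal_getHoursInMonths := by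
  intro months _hDom hPre
  unfold Spec_getHoursInMonths getHoursInMonths getHoursInMonths_alt
  simp only [PySem.List.foldl_append_eq_flatMap, List.nil_append, List.flatMap_assoc]
  apply List.flatMap_congr
  intro m hm
  exact pvMonth_block m (hPre m hm).1 (hPre m hm).2
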